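-- pv_equiv track=rewrite | github.com/Blaxav/Challenges-algo | AOC2020/Antoine/10.py | fractionScheme
-- ===== SOURCE A (Python) =====
-- def fractionScheme(scheme: list):
--     fractionnedScheme, offset = list(), 0
--     for i in range(len(scheme)-1):
--         if scheme[i] + 3 == scheme[i+1]:
--             fractionnedScheme.append(scheme[offset:i+1])
--             offset = i + 1
--     fractionnedScheme.append(scheme[offset:])
--     return fractionnedScheme
-- ===== SOURCE B (Python) =====
-- def fractionScheme(scheme: list):
--     # Streaming group-builder: one pass over the elements themselves,
--     # opening a new group whenever the previous element + 3 equals the current.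
--     groups = [[]]
--     prev = None
--     for x in scheme:
--         if prev is not None and prev + 3 == x:
--             groups.append([])
--         groups[-1].append(x)
--         prev = x
--     return groups
-- ===== Notes on version B (the rewrite author's own statement) =====
-- stated objective: alternative
-- what changed: B streams over the elements once, appending each element to the current group and opening a new group at a gap of exactly 3, instead of A's index loop that tracks an offset and cuts out slices scheme[offset:i+1].
import Mathlib
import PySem

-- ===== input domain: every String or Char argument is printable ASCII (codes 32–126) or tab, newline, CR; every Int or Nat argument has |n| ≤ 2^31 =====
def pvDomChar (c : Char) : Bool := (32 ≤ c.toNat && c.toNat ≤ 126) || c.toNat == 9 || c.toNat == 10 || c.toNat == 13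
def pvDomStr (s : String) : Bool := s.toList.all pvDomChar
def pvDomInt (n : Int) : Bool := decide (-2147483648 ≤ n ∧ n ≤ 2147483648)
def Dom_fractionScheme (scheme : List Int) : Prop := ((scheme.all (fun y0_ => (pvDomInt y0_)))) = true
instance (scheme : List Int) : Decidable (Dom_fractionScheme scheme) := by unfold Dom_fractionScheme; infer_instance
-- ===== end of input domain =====

-- B keeps A's behaviour but builds the groups by streaming over the elements (a different decomposition, same cost).

-- ===== PORT A =====
-- loop body of A's for-loop (state: the built list of fractions and the current offset)
def fsStep (scheme : List Int) (st : List (List Int) × Int) (i : Int) : List (List Int) × Int :=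
  if PySem.List.pyGetD scheme i 0 + 3 == PySem.List.pyGetD scheme (i + 1) 0 then
    (st.1 ++ [PySem.List.slice scheme (some st.2) (some (i + 1))], i + 1)
  else st

def fractionScheme (scheme : List Int) : List (List Int) :=
  let st := (PySem.List.pyRange 0 ((scheme.length : Int) - 1) 1).foldl (fsStep scheme) ([], 0)
  st.1 ++ [PySem.List.slice scheme (some st.2) none]

-- ===== PORT B =====
-- groups[-1].append(x)
def pushLast (gs : List (List Int)) (x : Int) : List (List Int) :=
  match gs with
  | [] => [[x]]
  | [g] => [g ++ [x]]
  | g :: rest => g :: pushLast rest x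

-- loop body of B's for-loop (state: groups and the previous element)
def fsAltStep (st : List (List Int) × Option Int) (x : Int) : List (List Int) × Option Int :=
  let gs := if (st.2.map (fun p => p + 3 == x)).getD false then st.1 ++ [[]] else st.1
  (pushLast gs x, some x)

def fractionScheme_alt (scheme : List Int) : List (List Int) :=
  (scheme.foldl fsAltStep ([[]], none)).1

-- ===== PRECONDITION & SPEC =====
def Spec_fractionScheme (scheme : List Int) (out : List (List Int)) : Prop := out = fractionScheme_alt scheme
instance (scheme : List Int) (out : List (List Int)) : Decidable (Spec_fractionScheme scheme out) := by unfold Spec_fractionScheme; infer_instance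

-- ===== CLAIM (what is proved, stated in full; the proofs are below) =====
def Claim_equal_fractionScheme : Prop := ∀ (scheme : List Int), Dom_fractionScheme scheme → Spec_fractionScheme scheme (fractionScheme scheme)

-- ===== LEMMAS AND PROOFS =====

-- canonical recursive splitting, the bridge between the two loops
def consHead (x : Int) : List (List Int) → List (List Int)
  | [] => [[x]]
  | g :: gs => (x :: g) :: gs

def chop : List Int → List (List Int)
  | [] => [[]]
  | [x] => [[x]]
  | x :: y :: ys => if x + 3 = y then [x] :: chop (y :: ys) else consHead x (chop (y :: ys))

theorem chop_ne_nil (xs : List Int) : chop xs ≠ [] := by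
  match xs with
  | [] => simp [chop]
  | [x] => simp [chop]
  | x :: y :: ys =>
    simp only [chop]
    split
    · simp
    · cases h : chop (y :: ys) with
      | nil => exact absurd h (chop_ne_nil _)
      | cons g gs => simp [consHead]

theorem pushLast_append_singleton (fr : List (List Int)) (g : List Int) (x : Int) :
    pushLast (fr ++ [g]) x = fr ++ [g ++ [x]] := by
  induction fr with
  | nil => simp [pushLast]
  | cons a t ih =>
    cases t with
    | nil => simp [pushLast]
    | cons b t' => simpa [pushLast] using ih

theorem pushLast_consHead (x y : Int) (gs : List (List Int)) (h : gs ≠ []) :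
    pushLast (consHead x gs) y = consHead x (pushLast gs y) := by
  match gs with
  | [] => exact absurd rfl h
  | [g] => simp [consHead, pushLast]
  | g :: g' :: t => simp [consHead, pushLast]

theorem chop_snoc (p : List Int) (hp : p ≠ []) (x : Int) :
    chop (p ++ [x]) =
      if p.getLast hp + 3 = x then chop p ++ [[x]] else pushLast (chop p) x := by
  match p with
  | [] => exact absurd rfl hp
  | [a] =>
    by_cases h : a + 3 = x <;> simp [chop, h, pushLast, consHead]
  | a :: b :: t =>
    have ih := chop_snoc (b :: t) (by simp) x
    have hlast : (a :: b :: t).getLast hp = (b :: t).getLast (by simp) := by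
      simp [List.getLast]
    rw [show (b :: t) ++ [x] = b :: (t ++ [x]) by simp] at ih
    simp only [List.cons_append, chop, hlast]
    by_cases hab : a + 3 = b
    · simp only [hab] at *
      rw [ih]
      by_cases hl : (b :: t).getLast (by simp) + 3 = x
      · simp [hl]
      · simp [hl]
        cases hc : chop (b :: t) with
        | nil => exact absurd hc (chop_ne_nil _)
        | cons g gs => simp [pushLast]
    · simp only [if_neg hab] at *
      rw [ih]
      by_cases hl : (b :: t).getLast (by simp) + 3 = x
      · simp only [if_pos hl]
        cases hc : chop (b :: t) with
        | nil => exact absurd hc (chop_ne_nil _)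
        | cons g gs => simp [consHead]
      · simp only [if_neg hl]
        exact (pushLast_consHead a x (chop (b :: t)) (chop_ne_nil _)).symm

-- B computes chop
theorem alt_inv (p : List Int) (x : Int) :
    (p ++ [x]).foldl fsAltStep ([[]], none) = (chop (p ++ [x]), some x) := by
  induction p using List.reverseRecOn generalizing x with
  | nil => simp [fsAltStep, chop, pushLast]
  | append_singleton t y ih =>
    rw [show t ++ [y] ++ [x] = (t ++ [y]) ++ [x] by simp, List.foldl_append, ih y]
    simp only [List.foldl_cons, List.foldl_nil]
    rw [chop_snoc (t ++ [y]) (by simp) x]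
    rw [List.getLast_append_singleton]
    by_cases h : y + 3 = x
    · have hb : (y + 3 == x) = true := by simp [h]
      simp only [fsAltStep, Option.map_some, Option.getD_some, hb, if_true]
      rw [pushLast_append_singleton, List.nil_append, if_pos h]
    · simp [fsAltStep, h]

theorem alt_eq_chop (scheme : List Int) : fractionScheme_alt scheme = chop scheme := by
  rcases List.eq_nil_or_concat scheme with h | ⟨t, x, h⟩
  · subst h; simp [fractionScheme_alt, chop]
  · subst h; rw [List.concat_eq_append, fractionScheme_alt, alt_inv t x]

-- A's loop invariant: after processing indices [0, k), the built fractions plus the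
-- open slice scheme[off : k+1] are exactly chop of the first k+1 elements.
theorem a_inv (scheme : List Int) (k : Nat) (hk : k + 1 ≤ scheme.length) :
    ∃ (fr : List (List Int)) (off : Nat),
      (PySem.List.pyRange 0 (k : Int) 1).foldl (fsStep scheme) ([], 0) = (fr, (off : Int)) ∧
      off ≤ k ∧
      chop (scheme.take (k + 1)) = fr ++ [(scheme.drop off).take (k + 1 - off)] := by
  induction k with
  | zero =>
    refine ⟨[], 0, by simp [PySem.List.pyRange_one_eq_nil], le_refl _, ?_⟩
    cases scheme with
    | nil => simp at hk
    | cons a t => simp [chop]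
  | succ k ih =>
    obtain ⟨fr, off, hfold, hoff, hchop⟩ := ih (by omega)
    have hpeel : PySem.List.pyRange 0 ((k + 1 : Nat) : Int) 1
        = PySem.List.pyRange 0 (k : Int) 1 ++ [(k : Int)] := by
      push_cast
      exact PySem.List.pyRange_one_succ_right (by positivity)
    rw [hpeel, List.foldl_append, hfold]
    simp only [List.foldl_cons, List.foldl_nil, fsStep]
    have hkl : k < scheme.length := by omega
    have hk1 : k + 1 < scheme.length := by omega
    have hg1 : PySem.List.pyGetD scheme (k : Int) 0 = scheme[k] := by
      rw [PySem.List.pyGetD_natCast]; exact List.getD_eq_getElem _ _ hkl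
    have hg2 : PySem.List.pyGetD scheme ((k : Int) + 1) 0 = scheme[k + 1] := by
      rw [show ((k : Int) + 1) = ((k + 1 : Nat) : Int) by push_cast; ring,
        PySem.List.pyGetD_natCast]
      exact List.getD_eq_getElem _ _ hk1
    -- take (k+2) = take (k+1) ++ [scheme[k+1]]
    have htake : scheme.take (k + 1 + 1) = scheme.take (k + 1) ++ [scheme[k + 1]] := by
      rw [List.take_add_one, List.getElem?_eq_getElem hk1]; rfl
    have htkne : scheme.take (k + 1) ≠ [] := by
      apply List.ne_nil_of_length_pos
      rw [List.length_take]
      omega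
    have hlast : (scheme.take (k + 1)).getLast htkne = scheme[k] := by
      rw [List.getLast_eq_getElem]
      have hl : (scheme.take (k + 1)).length = k + 1 := by
        rw [List.length_take]; omega
      simp only [hl]
      simp [List.getElem_take]
    have hsnoc := chop_snoc (scheme.take (k + 1)) htkne scheme[k + 1]
    rw [hlast] at hsnoc
    by_cases hcond : scheme[k] + 3 = scheme[k + 1]
    · refine ⟨fr ++ [PySem.List.slice scheme (some (off : Int)) (some ((k : Int) + 1))],
        k + 1, ?_, le_refl _, ?_⟩
      · simp [hg1, hg2, hcond]
      · rw [htake, hsnoc, if_pos hcond, hchop]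
        have hsl : PySem.List.slice scheme (some (off : Int)) (some ((k : Int) + 1))
            = (scheme.drop off).take (k + 1 - off) := by
          rw [show ((k : Int) + 1) = ((k + 1 : Nat) : Int) by push_cast; ring]
          rw [PySem.List.slice_natCast]
        rw [hsl]
        have h1 : (scheme.drop (k + 1)).take (k + 1 + 1 - (k + 1)) = [scheme[k + 1]] := by
          rw [show k + 1 + 1 - (k + 1) = 1 by omega, List.take_one, List.head?_drop,
            List.getElem?_eq_getElem hk1]
          rfl
        rw [h1]
    · refine ⟨fr, off, ?_, by omega, ?_⟩
      · simp [hg1, hg2, hcond]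
      · rw [htake, hsnoc, if_neg hcond, hchop, pushLast_append_singleton]
        have hlen : k + 1 - off < (scheme.drop off).length := by
          rw [List.length_drop]; omega
        have h2 : (scheme.drop off).take (k + 1 + 1 - off)
            = (scheme.drop off).take (k + 1 - off) ++ [(scheme.drop off)[k + 1 - off]] := by
          rw [show k + 1 + 1 - off = (k + 1 - off) + 1 by omega, List.take_add_one,
            List.getElem?_eq_getElem hlen]
          rfl
        have h3 : (scheme.drop off)[k + 1 - off] = scheme[k + 1] := by
          rw [List.getElem_drop]
          congr 1
          omega
        rw [h2, h3]

theorem a_eq_chop (scheme : List Int) : fractionScheme scheme = chop scheme := by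
  cases hn : scheme.length with
  | zero =>
    have : scheme = [] := List.eq_nil_of_length_eq_zero hn
    subst this
    simp [fractionScheme, chop, PySem.List.pyRange_one_eq_nil]
  | succ m =>
    obtain ⟨fr, off, hfold, hoff, hchop⟩ := a_inv scheme m (by omega)
    have : ((scheme.length : Int) - 1) = (m : Int) := by rw [hn]; push_cast; ring
    rw [fractionScheme, this, hfold]
    simp only
    rw [PySem.List.slice_from_natCast]
    have : scheme.take (m + 1) = scheme := by rw [List.take_of_length_le (by omega)]
    rw [this] at hchop
    rw [hchop]
    congr 1
    rw [List.take_of_length_le]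
    simp
    omega

-- ===== VERDICT (by name: the statement is the Claim_ definition above) =====
theorem fractionScheme_spec : Claim_equal_fractionScheme := by
  intro scheme _
  unfold Spec_fractionScheme
  rw [a_eq_chop, alt_eq_chop]
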